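-- pv_equiv track=rewrite | github.com/leihchen/leetcode | windows/main.py | matrixSummation
-- ===== SOURCE A (Python) =====
-- def matrixSummation(after):
--     n, m = len(after), len(after[0])
--     before = [[0] * m for _ in range(n)]
--     before[0][0] = after[0][0]
--     for i in range(n):
--         for j in range(m):
--             before[i][j] = after[i][j] + (0 if i == 0 or j == 0 else \
--                 after[i-1][j-1]) - (0 if i == 0 else after[i-1][j]) - (0 if j == 0 else after[i][j-1])
--     return before
-- ===== SOURCE B (Python) =====
-- def matrixSummation(after):
--     # Separable decomposition: undo the prefix sum one axis at a time.
--     m = len(after[0])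
--     # pass 1: subtract left neighbour within each row
--     H = [[row[j] - (row[j - 1] if j > 0 else 0) for j in range(m)] for row in after]
--     # pass 2: subtract the row above
--     before = []
--     prev = [0] * m
--     for hrow in H:
--         before.append([h - p for h, p in zip(hrow, prev)])
--         prev = hrow
--     return before
-- ===== Notes on version B (the rewrite author's own statement) =====
-- stated objective: alternative
-- what changed: Replaces the fused four-term per-cell formula with two separable single-axis sweeps: a first pass subtracts each cell's left neighbour giving an intermediate matrix H, a second pass subtracts the H-row above.
import Mathlib
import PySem

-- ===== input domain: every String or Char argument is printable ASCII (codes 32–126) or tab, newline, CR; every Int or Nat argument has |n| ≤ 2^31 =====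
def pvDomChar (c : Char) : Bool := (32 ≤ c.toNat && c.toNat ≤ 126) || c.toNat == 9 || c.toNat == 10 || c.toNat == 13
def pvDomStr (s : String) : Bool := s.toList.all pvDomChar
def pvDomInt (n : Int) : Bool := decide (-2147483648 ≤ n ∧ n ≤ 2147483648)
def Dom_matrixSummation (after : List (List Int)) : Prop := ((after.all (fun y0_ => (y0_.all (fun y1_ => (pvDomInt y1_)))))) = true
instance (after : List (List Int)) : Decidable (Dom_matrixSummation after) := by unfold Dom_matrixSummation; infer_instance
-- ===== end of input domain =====

-- B replaces A's fused four-term per-cell formula by two separable single-axis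
-- sweeps (a row-difference pass producing an intermediate matrix H, then a
-- column-difference pass); an alternative algorithm of the same cost.

-- ===== PORT A =====
-- after[i][j] as A reads it (indices are in range under Pre_, so the default is never used)
def pvA (after : List (List Int)) (i j : Int) : Int :=
  PySem.List.pyGetD (PySem.List.pyGetD after i []) j 0

-- A's per-cell four-term expression
def pvVal (after : List (List Int)) (i j : Int) : Int :=
  pvA after i j + (if i = 0 ∨ j = 0 then 0 else pvA after (i-1) (j-1))
    - (if i = 0 then 0 else pvA after (i-1) j)
    - (if j = 0 then 0 else pvA after i (j-1))

def matrixSummation (after : List (List Int)) : List (List Int) :=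
  let n : Int := after.length
  let m : Int := (PySem.List.pyGetD after 0 []).length
  let before : List (List Int) := List.replicate n.toNat (List.replicate m.toNat 0)
  let before := PySem.List.pySetD before 0
      (PySem.List.pySetD (PySem.List.pyGetD before 0 []) 0 (pvA after 0 0))
  (PySem.List.pyRange 0 n 1).foldl (fun b i =>
    (PySem.List.pyRange 0 m 1).foldl (fun b j =>
      PySem.List.pySetD b i
        (PySem.List.pySetD (PySem.List.pyGetD b i []) j (pvVal after i j))) b) before

-- ===== PORT B =====
-- pass-1 row of B: H[i][j] = row[j] - (row[j-1] if j > 0 else 0)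
def pvHRow (m : Int) (row : List Int) : List Int :=
  (PySem.List.pyRange 0 m 1).map (fun j =>
    PySem.List.pyGetD row j 0 - (if j > 0 then PySem.List.pyGetD row (j-1) 0 else 0))

def matrixSummation_alt (after : List (List Int)) : List (List Int) :=
  let m : Int := (PySem.List.pyGetD after 0 []).length
  let H : List (List Int) := after.map (pvHRow m)
  (H.foldl (fun (acc : List (List Int) × List Int) hrow =>
      (acc.1 ++ [(hrow.zip acc.2).map (fun p => p.1 - p.2)], hrow))
    ([], List.replicate m.toNat 0)).1

-- ===== PRECONDITION & SPEC =====
-- Pre_ = exactly the inputs A returns on: nonempty matrix, nonzero width of the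
-- first row (otherwise before[0][0] = after[0][0] raises IndexError), and every
-- row at least that wide (otherwise some after[i][j] raises IndexError).
def Pre_matrixSummation (after : List (List Int)) : Prop :=
  after ≠ [] ∧ 0 < (after.headD []).length ∧
    ∀ row ∈ after, (after.headD []).length ≤ row.length
instance (after : List (List Int)) : Decidable (Pre_matrixSummation after) := by
  unfold Pre_matrixSummation; infer_instance

def pvWitness_matrixSummation : List (List Int) := [[1, 2], [3, 5]]

def Spec_matrixSummation (after : List (List Int)) (out : List (List Int)) : Prop :=
  out = matrixSummation_alt after
instance (after : List (List Int)) (out : List (List Int)) : Decidable (Spec_matrixSummation after out) := by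
  unfold Spec_matrixSummation; infer_instance

-- ===== CLAIM (what is proved, stated in full; the proofs are below) =====
def Claim_equal_matrixSummation : Prop := ∀ (after : List (List Int)),
  Dom_matrixSummation after → Pre_matrixSummation after →
    Spec_matrixSummation after (matrixSummation after)

-- ===== LEMMAS AND PROOFS =====

theorem pvRowFold (g : Int → Int) (m : Nat) :
    ∀ (k : Nat), k ≤ m → ∀ (b : List Int), b.length = m →
      (PySem.List.pyRange 0 (k:Int) 1).foldl (fun r j => PySem.List.pySetD r j (g j)) b
        = (List.range k).map (fun a : Nat => g (a:Int)) ++ b.drop k := by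
  intro k
  induction k with
  | zero => intro _ b hb; simp [PySem.List.pyRange_one_eq_nil]
  | succ k ih =>
    intro hk b hb
    have h1 : ((k+1 : Nat) : Int) = (k:Int) + 1 := by push_cast; ring
    rw [h1, PySem.List.pyRange_one_succ_right (by positivity), List.foldl_append,
      ih (by omega) b hb]
    have hklt : k < b.length := by omega
    have hdrop : b.drop k = b[k] :: b.drop (k+1) := (List.getElem_cons_drop hklt).symm
    simp only [List.foldl_cons, List.foldl_nil, PySem.List.pySetD_natCast]
    rw [hdrop, List.set_append_right _ _ (by simp), List.range_succ]
    simp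
    rw [hdrop]
    rfl

theorem pvRowFactor (g : Int → Int) :
    ∀ (js : List Int) (b : List (List Int)) (i : Nat) (hi : i < b.length),
      js.foldl (fun b j => PySem.List.pySetD b (i:Int)
          (PySem.List.pySetD (PySem.List.pyGetD b (i:Int) []) j (g j))) b
        = b.set i (js.foldl (fun r j => PySem.List.pySetD r j (g j)) (b[i]'hi)) := by
  intro js
  induction js with
  | nil => intro b i hi; simp
  | cons j js ih =>
    intro b i hi
    have hget : PySem.List.pyGetD b (i:Int) [] = b[i] := by
      rw [PySem.List.pyGetD_natCast]; exact List.getD_eq_getElem _ _ hi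
    rw [List.foldl_cons, ih _ i (by simp [hi])]
    simp only [PySem.List.pySetD_natCast, hget]
    rw [List.getElem_set_self, List.set_set, List.foldl_cons]

theorem pvOuter (v : Int → Int → Int) (m n : Nat) :
    ∀ (k : Nat), k ≤ n → ∀ (b : List (List Int)), b.length = n → (∀ r ∈ b, r.length = m) →
      (PySem.List.pyRange 0 (k:Int) 1).foldl
        (fun b i => (PySem.List.pyRange 0 (m:Int) 1).foldl
          (fun b' j => PySem.List.pySetD b' i
            (PySem.List.pySetD (PySem.List.pyGetD b' i []) j (v i j))) b) b
      = (List.range k).map (fun i : Nat => (List.range m).map (fun j : Nat => v i j)) ++ b.drop k := by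
  intro k
  induction k with
  | zero => intro _ b hb _; simp [PySem.List.pyRange_one_eq_nil]
  | succ k ih =>
    intro hk b hb hr
    have h1 : ((k+1 : Nat) : Int) = (k:Int) + 1 := by push_cast; ring
    rw [h1, PySem.List.pyRange_one_succ_right (by positivity), List.foldl_append,
      ih (by omega) b hb hr, List.foldl_cons, List.foldl_nil]
    have hlen : ((List.range k).map (fun i : Nat => (List.range m).map (fun j : Nat => v i j)) ++ b.drop k).length = n := by
      simp; omega
    have hklt : k < ((List.range k).map (fun i : Nat => (List.range m).map (fun j : Nat => v i j)) ++ b.drop k).length := by omega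
    rw [pvRowFactor (v (k:Int)) _ _ k hklt]
    have hkb : k < b.length := by omega
    have hget : ((List.range k).map (fun i : Nat => (List.range m).map (fun j : Nat => v i j)) ++ b.drop k)[k]'hklt = b[k] := by
      rw [List.getElem_append_right (by simp)]
      simp
    rw [hget]
    have hrowlen : (b[k]'hkb).length = m := hr _ (List.getElem_mem hkb)
    rw [pvRowFold (v (k:Int)) m m le_rfl _ hrowlen]
    have hdrop : b.drop k = b[k] :: b.drop (k+1) := (List.getElem_cons_drop hkb).symm
    have hnil : List.drop m (b[k]'hkb) = [] := List.drop_eq_nil_of_le (by omega)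
    rw [hnil, List.append_nil, hdrop, List.set_append_right _ _ (by simp),
      List.range_succ, List.map_append]
    simp only [List.length_map, List.length_range, Nat.sub_self, List.set_cons_zero,
      List.map_cons, List.map_nil, List.append_assoc, List.cons_append, List.nil_append]

def pvPd (prev : List Int) (L : List (List Int)) : List (List Int) :=
  match L with
  | [] => []
  | x :: xs => (x.zip prev).map (fun p => p.1 - p.2) :: pvPd x xs

theorem pvFoldPd :
    ∀ (L : List (List Int)) (acc : List (List Int)) (prev : List Int),
      (L.foldl (fun (acc : List (List Int) × List Int) hrow =>
          (acc.1 ++ [(hrow.zip acc.2).map (fun p => p.1 - p.2)], hrow)) (acc, prev)).1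
        = acc ++ pvPd prev L := by
  intro L
  induction L with
  | nil => intro acc prev; simp [pvPd]
  | cons x xs ih =>
    intro acc prev
    rw [List.foldl_cons, ih, pvPd, List.append_assoc, List.singleton_append]

theorem pvPd_length (prev : List Int) (L : List (List Int)) :
    (pvPd prev L).length = L.length := by
  induction L generalizing prev with
  | nil => rfl
  | cons x xs ih => simp [pvPd, ih]

theorem pvPd_getElem :
    ∀ (L : List (List Int)) (prev : List Int) (i : Nat) (hi : i < L.length),
      (pvPd prev L)[i]'(by rw [pvPd_length]; exact hi)
        = ((L[i]'hi).zip (if h : i = 0 then prev else L[i-1]'(by omega))).map (fun p => p.1 - p.2) := by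
  intro L
  induction L with
  | nil => intro prev i hi; simp at hi
  | cons x xs ih =>
    intro prev i hi
    match i with
    | 0 => simp [pvPd]
    | Nat.succ i' =>
      simp only [pvPd, List.getElem_cons_succ]
      rw [ih x i' (by simpa using hi)]
      by_cases h0 : i' = 0
      · subst h0; simp
      · simp only [dif_neg h0, dif_neg (by omega : ¬ (i' + 1 = 0))]
        congr 1
        · congr 1
          match i', h0 with
          | Nat.succ i'', _ => simp

theorem pvHRow_length (m : Nat) (row : List Int) : (pvHRow (m:Int) row).length = m := by
  simp [pvHRow, PySem.List.length_pyRange_one]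

theorem pvHRow_getElem (m : Nat) (row : List Int) (j : Nat) (hj : j < m) :
    (pvHRow (m:Int) row)[j]'(by rw [pvHRow_length]; exact hj)
      = PySem.List.pyGetD row (j:Int) 0
        - (if (0:Int) < (j:Int) then PySem.List.pyGetD row ((j:Int)-1) 0 else 0) := by
  simp [pvHRow, List.getElem_map, PySem.List.getElem_pyRange_one]

theorem pvMain (after : List (List Int)) (hne : after ≠ [])
    (hm : 0 < (after.headD []).length)
    (hrows : ∀ row ∈ after, (after.headD []).length ≤ row.length) :
    matrixSummation after = matrixSummation_alt after := by
  have hn : 0 < after.length := List.length_pos_iff.mpr hne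
  have hhead : PySem.List.pyGetD after 0 [] = after.headD [] := by
    rw [PySem.List.pyGetD_zero]
    cases after with
    | nil => rfl
    | cons x xs => rfl
  have hA : matrixSummation after
      = (List.range after.length).map (fun i : Nat =>
          (List.range (after.headD []).length).map (fun j : Nat => pvVal after (i:Int) (j:Int))) := by
    unfold matrixSummation
    simp only [hhead, Int.toNat_natCast]
    rw [PySem.List.pySetD_of_nonneg _ _ le_rfl, PySem.List.pySetD_of_nonneg _ _ le_rfl,
      PySem.List.pyGetD_zero, List.getD_eq_getElem _ _ (by simpa using hn),
      List.getElem_replicate]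
    simp only [Int.toNat_zero]
    rw [pvOuter (pvVal after) (after.headD []).length after.length after.length le_rfl _
      (by simp) ?_]
    · rw [List.drop_eq_nil_of_le (by simp), List.append_nil]
    · intro r hr
      rcases List.mem_or_eq_of_mem_set hr with h | h
      · rcases List.eq_of_mem_replicate h with rfl
        simp
      · subst h; simp
  have hB : matrixSummation_alt after
      = pvPd (List.replicate (after.headD []).length 0)
          (after.map (pvHRow ((after.headD []).length : Int))) := by
    unfold matrixSummation_alt
    simp only [hhead, Int.toNat_natCast]
    rw [pvFoldPd, List.nil_append]
  rw [hA, hB]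
  apply List.ext_getElem
  · simp [pvPd_length]
  intro i h1 h2
  have hi : i < after.length := by simpa using h1
  rw [List.getElem_map]
  rw [pvPd_getElem _ _ i (by simpa using hi)]
  have hgetrow : ∀ (k : Nat) (hk : k < after.length),
      PySem.List.pyGetD after (k:Int) [] = after[k]'hk := fun k hk => by
    rw [PySem.List.pyGetD_natCast]; exact List.getD_eq_getElem _ _ hk
  have hrlen : ∀ (k : Nat) (hk : k < after.length),
      (after.headD []).length ≤ (after[k]'hk).length :=
    fun k hk => hrows _ (List.getElem_mem hk)
  apply List.ext_getElem
  · by_cases h0 : i = 0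
    · simp [h0, List.getElem_map, pvHRow_length]
    · simp [h0, List.getElem_map, pvHRow_length]
  · intro j hj1 hj2
    have hj : j < (after.headD []).length := by simpa using hj1
    simp only [List.getElem_range, List.getElem_map, List.getElem_zip]
    by_cases h0 : i = 0
    · subst h0
      simp only [reduceDIte, List.getElem_replicate, pvHRow_getElem _ _ _ hj]
      unfold pvVal pvA
      rw [hgetrow 0 hi]
      split_ifs <;> (first | ring1 | (exfalso; omega))
    · simp only [dif_neg h0, pvHRow_getElem _ _ _ hj]
      unfold pvVal pvA
      have hcast : (i:Int) - 1 = ((i-1:Nat):Int) := by omega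
      rw [hcast, hgetrow i hi, hgetrow (i-1) (by omega)]
      split_ifs <;> (first | ring1 | (exfalso; omega))

-- ===== VERDICT =====
theorem matrixSummation_spec : Claim_equal_matrixSummation := by
  intro after _ hpre
  unfold Spec_matrixSummation
  exact pvMain after hpre.1 hpre.2.1 hpre.2.2
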